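-- pv_equiv track=rewrite | github.com/ganeshparsads/OAs | hi.py | min_max_load_time
-- ===== SOURCE A (Python) =====
-- def min_max_load_time(burst_time, n, m):
--
--     left = max(burst_time)  # Minimum possible value
--
--     right = sum(burst_time)  # Maximum possible value
--
--     while left <= right:
--
--         mid = (left + right) // 2
--
--         resource_load = 0
--
--         count = 0
--
--         for task_time in burst_time:
--
--             if resource_load + task_time > mid:
--
--                 count += 1
--
--                 resource_load = 0
--
--             resource_load += task_time
--
--         if count < n:
--
--             right = mid - 1
--
--         else:
--
--             left = mid + 1
--
--     return left  # Minimum possible value of the maximum total load time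
-- ===== SOURCE B (Python) =====
-- def min_max_load_time(burst_time, n, m):
--     top = max(burst_time)
--     running = 0
--     prefix = [0]
--     for t in burst_time:
--         running += t
--         prefix.append(running)
--
--     def cuts_over(cap):
--         # cuts the greedy placement makes: a cut falls before the element at
--         # prefix position k whenever prefix[k] - anchor exceeds cap; the new
--         # segment then starts at that element, so the anchor becomes prefix[k-1]
--         cuts = 0
--         anchor = 0
--         prev = 0
--         for p in prefix[1:]:
--             if p - anchor > cap:
--                 cuts += 1
--                 anchor = prev
--             prev = p
--         return cuts
--
--     def search(lo, hi):
--         if lo > hi: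
--             return lo
--         mid = (lo + hi) // 2
--         if cuts_over(mid) < n:
--             return search(lo, mid - 1)
--         return search(mid + 1, hi)
--
--     return search(top, running)
-- ===== Notes on version B (the rewrite author's own statement) =====
-- stated objective: alternative
-- what changed: B keeps A's binary search on the answer (on lists with negative times the greedy count is non-monotone in the threshold, so A's value depends on the exact probe sequence and no other search strategy matches it exactly), but re-decomposes it: the feasibility count walks a precomputed prefix-sum array with an anchor/previous-value pair instead of a resetting load accumulator, and the interval is narrowed by recursion instead of a while loop.
import Mathlib
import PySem

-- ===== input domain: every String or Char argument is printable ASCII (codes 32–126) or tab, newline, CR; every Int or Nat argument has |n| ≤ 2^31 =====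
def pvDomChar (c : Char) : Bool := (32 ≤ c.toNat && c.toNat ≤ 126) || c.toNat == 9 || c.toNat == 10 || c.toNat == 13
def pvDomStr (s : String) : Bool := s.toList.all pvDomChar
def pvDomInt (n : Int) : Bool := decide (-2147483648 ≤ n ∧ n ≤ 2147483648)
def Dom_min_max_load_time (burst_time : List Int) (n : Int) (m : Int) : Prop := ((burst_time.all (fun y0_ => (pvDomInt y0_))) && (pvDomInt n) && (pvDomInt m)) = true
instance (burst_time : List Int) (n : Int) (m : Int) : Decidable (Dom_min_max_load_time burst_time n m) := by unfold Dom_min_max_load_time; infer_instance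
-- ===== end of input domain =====

-- B keeps A's binary search on the answer (on lists with negative times the greedy count is
-- non-monotone in the threshold, so A's value depends on the exact probe sequence and no other
-- search strategy matches it), but re-decomposes it: the feasibility count walks a precomputed
-- prefix-sum array with an anchor/previous pair instead of a resetting load accumulator, and the
-- interval is narrowed by recursion instead of a while loop (objective: alternative, same cost).

-- ===== PORT A =====
-- termination facts for the binary-search while-loop, cited by name in decreasing_by
theorem pvDecrLeft (lo hi : Int) (h : lo ≤ hi) :
    ((PySem.Int.floordiv (lo + hi) 2 - 1) + 1 - lo).toNat < (hi + 1 - lo).toNat := by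
  have hb := PySem.Int.floordiv_two_mid_bounds h
  omega

theorem pvDecrRight (lo hi : Int) (h : lo ≤ hi) :
    (hi + 1 - (PySem.Int.floordiv (lo + hi) 2 + 1)).toNat < (hi + 1 - lo).toNat := by
  have hb := PySem.Int.floordiv_two_mid_bounds h
  omega

-- inner for-loop body of A: state (resource_load, count)
def pvStepA (mid : Int) (st : Int × Int) (task_time : Int) : Int × Int :=
  if st.1 + task_time > mid then (0 + task_time, st.2 + 1) else (st.1 + task_time, st.2)

def pvCountA (burst_time : List Int) (mid : Int) : Int :=
  (burst_time.foldl (pvStepA mid) (0, 0)).2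

-- A's while-loop
def pvLoopA (burst_time : List Int) (n left right : Int) : Int :=
  if h : left ≤ right then
    let mid := PySem.Int.floordiv (left + right) 2
    if pvCountA burst_time mid < n then pvLoopA burst_time n left (mid - 1)
    else pvLoopA burst_time n (mid + 1) right
  else left
termination_by (right + 1 - left).toNat
decreasing_by
  · exact pvDecrLeft left right h
  · exact pvDecrRight left right h

def min_max_load_time (burst_time : List Int) (n : Int) (m : Int) : Int :=
  let left := (PySem.List.max? burst_time (fun x => x)).getD 0   -- max([]) raises ValueError: excluded by Pre_
  let right := burst_time.sum
  pvLoopA burst_time n left right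

-- ===== PORT B =====
-- B's prefix-sum loop: state (running, prefix)
def pvPrefixB (burst_time : List Int) : Int × List Int :=
  burst_time.foldl (fun (st : Int × List Int) t => (st.1 + t, st.2 ++ [st.1 + t])) (0, [0])

-- B's cuts_over loop body: state (cuts, anchor, prev)
def pvStepB (cap : Int) (st : Int × Int × Int) (p : Int) : Int × Int × Int :=
  if p - st.2.1 > cap then (st.1 + 1, st.2.2, p) else (st.1, st.2.1, p)

def pvCutsB (pfx : List Int) (cap : Int) : Int :=
  ((PySem.List.slice pfx (some 1) none).foldl (pvStepB cap) (0, 0, 0)).1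

-- B's recursive search
def pvSearchB (pfx : List Int) (n lo hi : Int) : Int :=
  if h : lo ≤ hi then
    let mid := PySem.Int.floordiv (lo + hi) 2
    if pvCutsB pfx mid < n then pvSearchB pfx n lo (mid - 1)
    else pvSearchB pfx n (mid + 1) hi
  else lo
termination_by (hi + 1 - lo).toNat
decreasing_by
  · exact pvDecrLeft lo hi h
  · exact pvDecrRight lo hi h

def min_max_load_time_alt (burst_time : List Int) (n : Int) (m : Int) : Int :=
  let top := (PySem.List.max? burst_time (fun x => x)).getD 0   -- max([]) raises ValueError: excluded by Pre_
  let sp := pvPrefixB burst_time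
  pvSearchB sp.2 n top sp.1

-- ===== PRECONDITION & SPEC =====
-- Pre_ excludes only the empty list, on which Python A (max of an empty sequence) raises ValueError.
def Pre_min_max_load_time (burst_time : List Int) (n : Int) (m : Int) : Prop := burst_time ≠ []
instance (burst_time : List Int) (n : Int) (m : Int) : Decidable (Pre_min_max_load_time burst_time n m) := by unfold Pre_min_max_load_time; infer_instance

def pvWitness_min_max_load_time : List Int × Int × Int := ([2, 1, 3], 2, 0)

def Spec_min_max_load_time (burst_time : List Int) (n : Int) (m : Int) (out : Int) : Prop := out = min_max_load_time_alt burst_time n m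
instance (burst_time : List Int) (n : Int) (m : Int) (out : Int) : Decidable (Spec_min_max_load_time burst_time n m out) := by unfold Spec_min_max_load_time; infer_instance

-- ===== CLAIM (what is proved, stated in full; the proofs are below) =====
def Claim_equal_min_max_load_time : Prop := ∀ (burst_time : List Int) (n : Int) (m : Int), Dom_min_max_load_time burst_time n m → Pre_min_max_load_time burst_time n m → Spec_min_max_load_time burst_time n m (min_max_load_time burst_time n m)

-- ===== LEMMAS AND PROOFS =====

-- the list of partial sums s+t1, s+t1+t2, … (what B's prefix loop appends after the leading 0)
def pvTail (s : Int) : List Int → List Int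
  | [] => []
  | t :: r => (s + t) :: pvTail (s + t) r

theorem pvPrefixB_foldl (bt : List Int) : ∀ (s : Int) (acc : List Int),
    bt.foldl (fun (st : Int × List Int) t => (st.1 + t, st.2 ++ [st.1 + t])) (s, acc)
      = (s + bt.sum, acc ++ pvTail s bt) := by
  induction bt with
  | nil => intro s acc; simp [pvTail]
  | cons t r ih => intro s acc; simp [pvTail, ih, add_assoc]

theorem pvPrefixB_eq (bt : List Int) : pvPrefixB bt = (bt.sum, 0 :: pvTail 0 bt) := by
  unfold pvPrefixB
  rw [pvPrefixB_foldl]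
  simp

-- the two inner loops count the same cuts: A's running load equals s - anchor,
-- where s is the prefix sum at the current position and anchor the segment start's prefix sum
theorem pvCount_loops (mid : Int) : ∀ (bt : List Int) (cnt load anchor s : Int),
    load = s - anchor →
    (bt.foldl (pvStepA mid) (load, cnt)).2
      = ((pvTail s bt).foldl (pvStepB mid) (cnt, anchor, s)).1 := by
  intro bt
  induction bt with
  | nil => intro cnt load anchor s _; simp [pvTail]
  | cons t r ih =>
    intro cnt load anchor s hl
    have hcond : (load + t > mid) = ((s + t) - anchor > mid) := by
      subst hl; ring_nf
    simp only [pvTail, List.foldl_cons, pvStepA, pvStepB]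
    by_cases hc : load + t > mid
    · have hc' : (s + t) - anchor > mid := by omega
      simp only [if_pos hc, if_pos hc']
      exact ih (cnt + 1) (0 + t) s (s + t) (by omega)
    · have hc' : ¬ ((s + t) - anchor > mid) := by omega
      simp only [if_neg hc, if_neg hc']
      exact ih cnt (load + t) anchor (s + t) (by omega)

theorem pvCount_eq (bt : List Int) (mid : Int) :
    pvCountA bt mid = pvCutsB (0 :: pvTail 0 bt) mid := by
  unfold pvCountA pvCutsB
  have hsl : PySem.List.slice (0 :: pvTail 0 bt) (some 1) none = pvTail 0 bt := by
    have := PySem.List.slice_from_natCast (xs := 0 :: pvTail 0 bt) (a := 1)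
    simpa using this
  rw [hsl]
  exact pvCount_loops mid bt 0 0 0 0 (by omega)

theorem pvSearch_eq (bt : List Int) (n : Int) : ∀ (N : ℕ) (lo hi : Int),
    (hi + 1 - lo).toNat ≤ N →
    pvLoopA bt n lo hi = pvSearchB (0 :: pvTail 0 bt) n lo hi := by
  intro N
  induction N with
  | zero =>
    intro lo hi hN
    have hlt : ¬ lo ≤ hi := by omega
    rw [pvLoopA, pvSearchB]
    simp [hlt]
  | succ N ih =>
    intro lo hi hN
    rw [pvLoopA, pvSearchB]
    by_cases hle : lo ≤ hi
    · have hb := PySem.Int.floordiv_two_mid_bounds hle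
      simp only [dif_pos hle]
      rw [pvCount_eq]
      by_cases hcut : pvCutsB (0 :: pvTail 0 bt) (PySem.Int.floordiv (lo + hi) 2) < n
      · simp only [if_pos hcut]
        exact ih lo (PySem.Int.floordiv (lo + hi) 2 - 1) (by omega)
      · simp only [if_neg hcut]
        exact ih (PySem.Int.floordiv (lo + hi) 2 + 1) hi (by omega)
    · simp [hle]

theorem pv_main (bt : List Int) (n m : Int) :
    min_max_load_time bt n m = min_max_load_time_alt bt n m := by
  unfold min_max_load_time min_max_load_time_alt
  rw [pvPrefixB_eq]
  exact pvSearch_eq bt n ((bt.sum + 1 - ((PySem.List.max? bt (fun x => x)).getD 0)).toNat)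
    ((PySem.List.max? bt (fun x => x)).getD 0) bt.sum (le_refl _)

-- ===== VERDICT (by name: the statement is the Claim_ definition above) =====
theorem min_max_load_time_spec : Claim_equal_min_max_load_time := by
  intro burst_time n m _ _
  unfold Spec_min_max_load_time
  exact pv_main burst_time n m
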